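-- pv_equiv track=rewrite | github.com/changLiCoding/pythonLC | maxBeautifulSubstring/maxBeautiful.py | maximizeBeautifulSubstrings
-- ===== SOURCE A (Python) =====
-- def maximizeBeautifulSubstrings(color: str) -> int:
--   s = list(color)
--   n = len(color)
--
--   for i in range(n):
--     if s[i] == '.':
--       if i > 0 and s[i - 1] != '.':
--         s[i] = s[i - 1]
--       else:
--         j = i + 1
--         while j < n and s[j] == '.':
--           j+=1
--         s[i] = s[j] if j < n else 'a'
--
--   total = 0
--   count = 1
--   for i in range(1, n):
--     if s[i] == s[i-1]:
--       count += 1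
--     else:
--       total += count * (count + 1) // 2
--       count = 1
--   total += count * (count + 1) // 2
--
--   return total
-- ===== SOURCE B (Python) =====
-- def maximizeBeautifulSubstrings(color: str) -> int:
--     total = 0
--     count = 1
--     run_char = color[0] if color and color[0] != '.' else None
--     for ch in color[1:]:
--         if ch == '.' or run_char is None or ch == run_char:
--             count += 1
--             if run_char is None and ch != '.':
--                 run_char = ch
--         else:
--             total += count * (count + 1) // 2
--             count = 1
--             run_char = ch
--     return total + count * (count + 1) // 2
-- ===== Notes on version B (the rewrite author's own statement) =====
-- stated objective: faster
-- what changed: B replaces A's two passes (mutating fill of every '.' with a forward scan over dot runs, then a run-counting pass over the filled list) by a single scan that never materializes a filled list, tracking only the current run length and the letter defining the run (None while in a leading all-dot prefix).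
import Mathlib
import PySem

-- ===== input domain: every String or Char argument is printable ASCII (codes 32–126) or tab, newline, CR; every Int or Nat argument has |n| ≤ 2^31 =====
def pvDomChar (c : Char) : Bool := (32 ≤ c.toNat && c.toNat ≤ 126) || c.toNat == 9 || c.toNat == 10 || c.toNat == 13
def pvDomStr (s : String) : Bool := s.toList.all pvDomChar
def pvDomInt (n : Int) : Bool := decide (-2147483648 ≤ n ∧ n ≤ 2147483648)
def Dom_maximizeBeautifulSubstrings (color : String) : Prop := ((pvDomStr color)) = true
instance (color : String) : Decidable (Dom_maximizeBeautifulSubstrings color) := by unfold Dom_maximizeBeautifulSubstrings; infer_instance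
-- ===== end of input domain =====

-- B fuses A's fill pass and counting pass into one O(1)-space scan (no filled list is built);
-- the return value is proved identical on all inputs (including 1 for the empty string).

-- ===== PORT A =====
-- A's inner `while j < n and s[j] == '.': j += 1; s[i] = s[j] if j < n else 'a'`,
-- scanning the (still original) characters after position i:
def fillScan : List Char → Char
  | [] => 'a'
  | c :: rest => if c = '.' then fillScan rest else c

-- A's first loop `for i in range(n)` over the mutating list `s`, carried as a recursion
-- where `prev?` is `s[i-1]` after its update (none at i = 0) and `rest` the untouched suffix:
def fillLoop : Option Char → List Char → List Char
  | _, [] => []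
  | prev?, c :: rest =>
    let c' := if c = '.' then
        (match prev? with
         | some p => if p ≠ '.' then p else fillScan rest
         | none => fillScan rest)
      else c
    c' :: fillLoop (some c') rest

-- A's second loop `for i in range(1, n)` with `total`, `count`, comparing s[i] with s[i-1],
-- plus the trailing `total += count*(count+1)//2`:
def countLoop (total count : Int) : Char → List Char → Int
  | _, [] => total + PySem.Int.floordiv (count * (count + 1)) 2
  | prev, c :: rest =>
    if c = prev then countLoop total (count + 1) c rest
    else countLoop (total + PySem.Int.floordiv (count * (count + 1)) 2) 1 c rest

def maximizeBeautifulSubstrings (color : String) : Int :=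
  match fillLoop none color.toList with
  | [] => (0 : Int) + PySem.Int.floordiv (1 * (1 + 1)) 2   -- n = 0: total = 0, count = 1, final add
  | c :: rest => countLoop 0 1 c rest

-- ===== PORT B =====
-- B's single loop over color[1:] with state (total, count, run_char):
def runLoop : Int → Int → Option Char → List Char → Int
  | total, count, _, [] => total + PySem.Int.floordiv (count * (count + 1)) 2
  | total, count, rc, ch :: rest =>
    if ch = '.' ∨ rc = none ∨ rc = some ch then
      runLoop total (count + 1) (if rc = none ∧ ch ≠ '.' then some ch else rc) rest
    else runLoop (total + PySem.Int.floordiv (count * (count + 1)) 2) 1 (some ch) rest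

def maximizeBeautifulSubstrings_alt (color : String) : Int :=
  match color.toList with
  | [] => runLoop 0 1 none []
  | c :: rest => runLoop 0 1 (if c ≠ '.' then some c else none) rest

-- ===== PRECONDITION & SPEC =====
def Spec_maximizeBeautifulSubstrings (color : String) (out : Int) : Prop := out = maximizeBeautifulSubstrings_alt color
instance (color : String) (out : Int) : Decidable (Spec_maximizeBeautifulSubstrings color out) := by unfold Spec_maximizeBeautifulSubstrings; infer_instance

-- ===== CLAIM (what is proved, stated in full; the proofs are below) =====
def Claim_equal_maximizeBeautifulSubstrings : Prop := ∀ (color : String), Dom_maximizeBeautifulSubstrings color → Spec_maximizeBeautifulSubstrings color (maximizeBeautifulSubstrings color)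

-- ===== LEMMAS AND PROOFS =====

theorem fillScan_ne_dot (l : List Char) : fillScan l ≠ '.' := by
  induction l with
  | nil => decide
  | cons c rest ih =>
    simp only [fillScan]
    split_ifs with h
    · exact ih
    · exact h

-- While the run letter is known (p ≠ '.'), B's scan of the raw suffix equals A's count
-- of the suffix filled with previous letter p.
theorem runLoop_some (rest : List Char) : ∀ (total count : Int) (p : Char), p ≠ '.' →
    runLoop total count (some p) rest = countLoop total count p (fillLoop (some p) rest) := by
  induction rest with
  | nil => intro total count p _; simp [runLoop, fillLoop, countLoop]
  | cons ch t ih =>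
    intro total count p hp
    by_cases hd : ch = '.'
    · subst hd
      simp only [runLoop, fillLoop, countLoop]
      simp [hp, ih total (count + 1) p hp]
    · by_cases he : ch = p
      · subst he
        simp only [runLoop, fillLoop, countLoop]
        simp [hd, ih total (count + 1) ch hd]
      · simp only [runLoop, fillLoop, countLoop]
        simp [hd, he, Ne.symm he]
        exact ih _ 1 ch hd

-- While inside a leading all-dot prefix (run_char = None), A's previously filled letter is
-- exactly the first non-dot letter of the raw suffix (or 'a'), i.e. fillScan rest.
theorem runLoop_none (rest : List Char) : ∀ (total count : Int),
    runLoop total count none rest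
      = countLoop total count (fillScan rest) (fillLoop (some (fillScan rest)) rest) := by
  induction rest with
  | nil => intro total count; simp [runLoop, countLoop, fillLoop]
  | cons ch t ih =>
    intro total count
    by_cases hd : ch = '.'
    · subst hd
      simp only [runLoop, fillScan, fillLoop, countLoop]
      simp [fillScan_ne_dot t, ih total (count + 1)]
    · simp only [runLoop, fillScan, fillLoop, countLoop]
      simp [hd, runLoop_some t total (count + 1) ch hd]

-- ===== VERDICT (by name: the statement is the Claim_ definition above) =====
theorem maximizeBeautifulSubstrings_spec : Claim_equal_maximizeBeautifulSubstrings := by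
  intro color _
  unfold Spec_maximizeBeautifulSubstrings maximizeBeautifulSubstrings maximizeBeautifulSubstrings_alt
  cases h : color.toList with
  | nil => simp [fillLoop, runLoop, PySem.Int.floordiv]
  | cons c rest =>
    by_cases hd : c = '.'
    · subst hd
      simp [fillLoop, runLoop_none rest 0 1]
    · simp only [fillLoop]
      simp [hd, runLoop_some rest 0 1 c hd]
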